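-- pv_equiv track=rewrite | github.com/GDoutre8/machinetomarket | tools/mtm_regression_check.py | find_record
-- ===== SOURCE A (Python) =====
-- def find_record(records, display_name, registry_model_name=None):
--     """Find a registry record by matching manufacturer + model against display_name."""
--     search_name = (registry_model_name or display_name).lower().strip()
--
--     # Strategy 1: exact match on "manufacturer model" concatenated
--     for rec in records:
--         mfr = rec.get("manufacturer", "").lower().strip()
--         model = rec.get("model", "").lower().strip()
--         full = f"{mfr} {model}"
--         if full == search_name:
--             return rec
--
--     # Strategy 2: search_name starts with mfr and ends with model (handles multi-word mfr)
--     for rec in records: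
--         mfr = rec.get("manufacturer", "").lower().strip()
--         model = rec.get("model", "").lower().strip()
--         if search_name.startswith(mfr) and search_name.endswith(model):
--             return rec
--
--     # Strategy 3: model exact match + manufacturer contained
--     parts = search_name.split()
--     for i in range(1, len(parts)):
--         model_candidate = " ".join(parts[i:])
--         mfr_candidate = " ".join(parts[:i])
--         for rec in records:
--             mfr = rec.get("manufacturer", "").lower().strip()
--             model = rec.get("model", "").lower().strip()
--             if mfr_candidate in mfr and model == model_candidate:
--                 return rec
--
--     return None
-- ===== SOURCE B (Python) =====
-- def find_record(records, display_name, registry_model_name=None):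
--     """Single-pass ranked search for a registry record.
--
--     Each record gets a priority rank against the search name: 0 = exact
--     '<manufacturer> <model>' match, 1 = prefix/suffix match, 2+j = first
--     matching split of the search name at word j.  One scan keeps the
--     lowest-ranked (earliest on ties) record; rank 0 wins immediately.
--     """
--     search_name = (registry_model_name or display_name).lower().strip()
--     parts = search_name.split()
--     cands = [(" ".join(parts[:i]), " ".join(parts[i:])) for i in range(1, len(parts))]
--
--     best = None  # (rank, record), rank >= 1
--     for rec in records:
--         mfr = rec.get("manufacturer", "").lower().strip()
--         model = rec.get("model", "").lower().strip()
--         if " ".join((mfr, model)) == search_name: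
--             return rec
--         r = _rec_rank(search_name, mfr, model, cands)
--         if r is not None and (best is None or r < best[0]):
--             best = (r, rec)
--     return best[1] if best is not None else None
--
--
-- def _rec_rank(search_name, mfr, model, cands):
--     """Smallest rank >= 1 at which (mfr, model) matches search_name, else None."""
--     if search_name.startswith(mfr) and search_name.endswith(model):
--         return 1
--     for j, (mc, mdl) in enumerate(cands):
--         if mc in mfr and model == mdl:
--             return 2 + j
--     return None
-- ===== Notes on version B (the rewrite author's own statement) =====
-- stated objective: alternative
-- what changed: B replaces A's three staged rescans of the record list by a single pass that assigns each record a priority rank (0 exact, 1 prefix/suffix, 2+j first matching split) and keeps the lowest-rank earliest record in an accumulator.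
import Mathlib
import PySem

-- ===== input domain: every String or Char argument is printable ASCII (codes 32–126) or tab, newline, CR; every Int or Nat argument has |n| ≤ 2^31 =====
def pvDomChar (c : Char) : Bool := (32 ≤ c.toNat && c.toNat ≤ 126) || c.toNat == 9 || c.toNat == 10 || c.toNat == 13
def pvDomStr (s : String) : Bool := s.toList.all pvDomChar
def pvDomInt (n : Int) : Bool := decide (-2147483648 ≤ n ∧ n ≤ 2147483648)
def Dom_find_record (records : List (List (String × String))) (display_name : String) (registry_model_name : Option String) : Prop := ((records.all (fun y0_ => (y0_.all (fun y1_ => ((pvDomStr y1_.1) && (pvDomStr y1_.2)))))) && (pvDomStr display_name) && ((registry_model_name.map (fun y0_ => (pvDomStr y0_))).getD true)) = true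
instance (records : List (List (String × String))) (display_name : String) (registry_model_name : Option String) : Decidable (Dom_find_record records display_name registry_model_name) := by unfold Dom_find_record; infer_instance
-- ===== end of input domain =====

-- B replaces A's three staged rescans by ONE pass that ranks each record
-- (0 exact, 1 prefix/suffix, 2+j first matching split) and keeps the
-- lowest-rank earliest record (objective: alternative algorithm).

-- ===== PORT A =====

-- rec.get(key, "").lower().strip()
def frField (rec : List (String × String)) (key : String) : String :=
  PySem.Str.strip (PySem.Str.lower (PySem.Dict.getD (PySem.Dict.mk rec) key ""))

-- (registry_model_name or display_name).lower().strip()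
def frSearchName (display_name : String) (registry_model_name : Option String) : String :=
  PySem.Str.strip (PySem.Str.lower
    (match registry_model_name with
     | some s => if s == "" then display_name else s   -- Python 'or': "" is falsy
     | none => display_name))

-- Strategy 1 loop of A
def frLoop1 (records : List (List (String × String))) (search_name : String) :
    Option (List (String × String)) :=
  match records with
  | [] => none
  | rec :: rest =>
    let mfr := frField rec "manufacturer"
    let model := frField rec "model"
    let full := PySem.Str.join " " [mfr, model]   -- f"{mfr} {model}"
    if full == search_name then some rec else frLoop1 rest search_name

-- Strategy 2 loop of A
def frLoop2 (records : List (List (String × String))) (search_name : String) :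
    Option (List (String × String)) :=
  match records with
  | [] => none
  | rec :: rest =>
    let mfr := frField rec "manufacturer"
    let model := frField rec "model"
    if PySem.Str.startswith search_name mfr && PySem.Str.endswith search_name model
    then some rec else frLoop2 rest search_name

-- Strategy 3 inner loop of A (over all records)
def frLoop3Inner (records : List (List (String × String)))
    (mfr_candidate model_candidate : String) : Option (List (String × String)) :=
  match records with
  | [] => none
  | rec :: rest =>
    let mfr := frField rec "manufacturer"
    let model := frField rec "model"
    if PySem.Str.isIn mfr_candidate mfr && model == model_candidate
    then some rec else frLoop3Inner rest mfr_candidate model_candidate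

-- Strategy 3 outer loop of A (over i in range(1, len(parts)))
def frLoop3 (records : List (List (String × String))) (parts : List String)
    (is_ : List Int) : Option (List (String × String)) :=
  match is_ with
  | [] => none
  | i :: rest =>
    let model_candidate := PySem.Str.join " " (PySem.List.slice parts (some i) none)
    let mfr_candidate := PySem.Str.join " " (PySem.List.slice parts none (some i))
    match frLoop3Inner records mfr_candidate model_candidate with
    | some rec => some rec
    | none => frLoop3 records parts rest

def find_record (records : List (List (String × String))) (display_name : String)
    (registry_model_name : Option String) : Option (List (String × String)) :=
  let search_name := frSearchName display_name registry_model_name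
  match frLoop1 records search_name with
  | some rec => some rec
  | none =>
    match frLoop2 records search_name with
    | some rec => some rec
    | none =>
      let parts := PySem.Str.split₀ search_name
      frLoop3 records parts (PySem.List.pyRange 1 (PySem.List.len parts) 1)

-- ===== PORT B =====

-- cands = [(" ".join(parts[:i]), " ".join(parts[i:])) for i in range(1, len(parts))]
def altCands (parts : List String) : List (String × String) :=
  (PySem.List.pyRange 1 (PySem.List.len parts) 1).map (fun i =>
    (PySem.Str.join " " (PySem.List.slice parts none (some i)),
     PySem.Str.join " " (PySem.List.slice parts (some i) none)))

-- the enumerate loop of _rec_rank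
def rankLoop (model mfr : String) (cands : List (String × String)) (j : Nat) : Option Nat :=
  match cands with
  | [] => none
  | (mc, mdl) :: rest =>
    if PySem.Str.isIn mc mfr && model == mdl then some (2 + j)
    else rankLoop model mfr rest (j + 1)

-- _rec_rank(search_name, mfr, model, cands)
def recRank (search_name mfr model : String) (cands : List (String × String)) : Option Nat :=
  if PySem.Str.startswith search_name mfr && PySem.Str.endswith search_name model then some 1
  else rankLoop model mfr cands 0

-- the single pass of B, carrying best = None | (rank, rec)
def altLoop (search_name : String) (cands : List (String × String))
    (records : List (List (String × String)))
    (best : Option (Nat × List (String × String))) : Option (List (String × String)) :=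
  match records with
  | [] => best.map Prod.snd
  | rec :: rest =>
    let mfr := frField rec "manufacturer"
    let model := frField rec "model"
    if PySem.Str.join " " [mfr, model] == search_name then some rec
    else
      let best' :=
        match recRank search_name mfr model cands with
        | none => best
        | some r =>
          match best with
          | none => some (r, rec)
          | some b => if r < b.1 then some (r, rec) else best
      altLoop search_name cands rest best'

def find_record_alt (records : List (List (String × String))) (display_name : String)
    (registry_model_name : Option String) : Option (List (String × String)) :=
  let search_name := frSearchName display_name registry_model_name
  let parts := PySem.Str.split₀ search_name
  altLoop search_name (altCands parts) records none

-- ===== PRECONDITION & SPEC =====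
def Spec_find_record (records : List (List (String × String))) (display_name : String) (registry_model_name : Option String) (out : Option (List (String × String))) : Prop := out = find_record_alt records display_name registry_model_name
instance (records : List (List (String × String))) (display_name : String) (registry_model_name : Option String) (out : Option (List (String × String))) : Decidable (Spec_find_record records display_name registry_model_name out) := by unfold Spec_find_record; infer_instance

-- ===== CLAIM =====
def Claim_equal_find_record : Prop := ∀ (records : List (List (String × String))) (display_name : String) (registry_model_name : Option String), Dom_find_record records display_name registry_model_name → Spec_find_record records display_name registry_model_name (find_record records display_name registry_model_name)

-- ===== LEMMAS AND PROOFS =====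

-- lexicographic min on ranks, ties to the LEFT (earlier record)
def mergeB (a b : Option (Nat × List (String × String))) :
    Option (Nat × List (String × String)) :=
  match a, b with
  | none, b => b
  | some x, none => some x
  | some x, some y => if x.1 ≤ y.1 then some x else some y

theorem mergeB_none (b : Option (Nat × List (String × String))) : mergeB none b = b := by
  rcases b with _ | x <;> rfl

-- reference: best (rank, rec) over a record list, ranks via recRank
def selAll (s : String) (cands : List (String × String))
    (records : List (List (String × String))) : Option (Nat × List (String × String)) :=
  match records with
  | [] => none
  | rec :: rest =>
    mergeB ((recRank s (frField rec "manufacturer") (frField rec "model") cands).map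
              (fun r => (r, rec)))
           (selAll s cands rest)

-- reference: staged strategy-3 selection with ranks attached
def sel3 (records : List (List (String × String))) (cands : List (String × String))
    (j : Nat) : Option (Nat × List (String × String)) :=
  match cands with
  | [] => none
  | (mc, mdl) :: rest =>
    match frLoop3Inner records mc mdl with
    | some rec => some (2 + j, rec)
    | none => sel3 records rest (j + 1)

theorem mergeB_assoc (a b c : Option (Nat × List (String × String))) :
    mergeB (mergeB a b) c = mergeB a (mergeB b c) := by
  rcases a with _ | x
  · rfl
  · rcases b with _ | y
    · rfl
    · rcases c with _ | z
      · simp [mergeB]; split_ifs <;> rfl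
      · by_cases h1 : x.1 ≤ y.1 <;> by_cases h2 : y.1 ≤ z.1 <;> by_cases h3 : x.1 ≤ z.1 <;>
          simp [mergeB, h1, h2, h3] <;> omega

theorem mergeB_eq_some (a b : Option (Nat × List (String × String)))
    (p : Nat × List (String × String)) (h : mergeB a b = some p) :
    a = some p ∨ b = some p := by
  rcases a with _ | x
  · right; exact h
  · rcases b with _ | y
    · left; exact h
    · simp only [mergeB] at h
      split_ifs at h
      · left; exact h
      · right; exact h

theorem rankLoop_ge (model mfr : String) (cands : List (String × String)) (j k : Nat)
    (h : rankLoop model mfr cands j = some k) : 2 + j ≤ k := by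
  induction cands generalizing j with
  | nil => simp [rankLoop] at h
  | cons c rest ih =>
    obtain ⟨mc, mdl⟩ := c
    simp only [rankLoop] at h
    split_ifs at h with hc
    · simp only [Option.some.injEq] at h; omega
    · have := ih (j + 1) h; omega

theorem recRank_ge (s mfr model : String) (cands : List (String × String)) (k : Nat)
    (h : recRank s mfr model cands = some k) : 1 ≤ k := by
  unfold recRank at h
  split_ifs at h with hc
  · simp_all
  · have := rankLoop_ge model mfr cands 0 k h; omega

theorem selAll_ge (s : String) (cands : List (String × String))
    (records : List (List (String × String))) (p : Nat × List (String × String))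
    (h : selAll s cands records = some p) : 1 ≤ p.1 := by
  induction records with
  | nil => simp [selAll] at h
  | cons rec rest ih =>
    simp only [selAll] at h
    rcases mergeB_eq_some _ _ _ h with h1 | h1
    · rcases Option.map_eq_some_iff.mp h1 with ⟨r, hr, hp⟩
      subst hp
      exact recRank_ge _ _ _ _ _ hr
    · exact ih h1

theorem sel3_ge (records : List (List (String × String))) (cands : List (String × String))
    (j : Nat) (p : Nat × List (String × String)) (h : sel3 records cands j = some p) :
    2 + j ≤ p.1 := by
  induction cands generalizing j with
  | nil => simp [sel3] at h
  | cons c rest ih =>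
    obtain ⟨mc, mdl⟩ := c
    simp only [sel3] at h
    rcases hi : frLoop3Inner records mc mdl with _ | r <;> rw [hi] at h
    · have := ih (j + 1) h; omega
    · injection h with h; subst h; simp

theorem sel3_nil (cands : List (String × String)) (j : Nat) :
    sel3 [] cands j = none := by
  induction cands generalizing j with
  | nil => rfl
  | cons c rest ih => obtain ⟨mc, mdl⟩ := c; simp [sel3, frLoop3Inner, ih]

-- per-record decomposition of sel3
theorem sel3_cons (rec : List (String × String)) (rest : List (List (String × String)))
    (cands : List (String × String)) (j : Nat) :
    sel3 (rec :: rest) cands j =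
      mergeB ((rankLoop (frField rec "model") (frField rec "manufacturer") cands j).map
                (fun r => (r, rec)))
             (sel3 rest cands j) := by
  induction cands generalizing j with
  | nil => rfl
  | cons c candsRest ih =>
    obtain ⟨mc, mdl⟩ := c
    simp only [sel3, frLoop3Inner, rankLoop]
    by_cases hrec : (PySem.Str.isIn mc (frField rec "manufacturer")
        && (frField rec "model") == mdl) = true
    · rw [if_pos hrec, if_pos hrec]
      rcases hs : frLoop3Inner rest mc mdl with _ | r'
      · rcases h3 : sel3 rest candsRest (j + 1) with _ | q
        · simp [mergeB]
        · have hq := sel3_ge rest candsRest (j + 1) q h3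
          have hle : 2 + j ≤ q.1 := by omega
          simp [mergeB, hle]
      · simp [mergeB]
    · rw [if_neg hrec, if_neg hrec]
      rcases hs : frLoop3Inner rest mc mdl with _ | r'
      · simp [ih (j + 1)]
      · rcases hr : rankLoop (frField rec "model") (frField rec "manufacturer") candsRest (j + 1)
          with _ | k
        · simp [mergeB]
        · have hk := rankLoop_ge _ _ _ _ _ hr
          have hnot : ¬ (k ≤ 2 + j) := by omega
          simp [mergeB, hnot]

-- if strategy 2 fires, selAll returns exactly its (rank-1) record
theorem selAll_of_loop2 (s : String) (cands : List (String × String))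
    (records : List (List (String × String))) (r : List (String × String))
    (h : frLoop2 records s = some r) : selAll s cands records = some (1, r) := by
  induction records with
  | nil => simp [frLoop2] at h
  | cons rec rest ih =>
    simp only [frLoop2] at h
    by_cases ht : (PySem.Str.startswith s (frField rec "manufacturer")
        && PySem.Str.endswith s (frField rec "model")) = true
    · rw [if_pos ht] at h
      simp only [Option.some.injEq] at h; subst h
      simp only [selAll, recRank]
      rw [if_pos ht]
      rcases hs : selAll s cands rest with _ | q
      · rfl
      · have := selAll_ge s cands rest q hs
        simp only [Option.map_some, mergeB]
        rw [if_pos (by omega)]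
    · rw [if_neg ht] at h
      simp only [selAll, recRank]
      rw [if_neg ht, ih h]
      rcases hr : rankLoop (frField rec "model") (frField rec "manufacturer") cands 0 with _ | k
      · simp [mergeB]
      · have := rankLoop_ge _ _ _ _ _ hr
        simp only [Option.map_some, mergeB]
        rw [if_neg (by omega)]

-- if strategy 2 never fires, selAll is exactly the staged strategy-3 selection
theorem selAll_of_loop2_none (s : String) (cands : List (String × String))
    (records : List (List (String × String)))
    (h : frLoop2 records s = none) : selAll s cands records = sel3 records cands 0 := by
  induction records with
  | nil => simp [selAll, sel3_nil]
  | cons rec rest ih =>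
    simp only [frLoop2] at h
    by_cases ht : (PySem.Str.startswith s (frField rec "manufacturer")
        && PySem.Str.endswith s (frField rec "model")) = true
    · rw [if_pos ht] at h; exact absurd h (by simp)
    · rw [if_neg ht] at h
      rw [sel3_cons, ← ih h]
      simp only [selAll, recRank]
      rw [if_neg ht]

-- A's strategy-3 loop over indices = sel3 over the materialized candidate pairs
theorem frLoop3_eq_sel3 (records : List (List (String × String))) (parts : List String)
    (is_ : List Int) (j : Nat) :
    frLoop3 records parts is_ =
      (sel3 records (is_.map (fun i =>
        (PySem.Str.join " " (PySem.List.slice parts none (some i)),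
         PySem.Str.join " " (PySem.List.slice parts (some i) none)))) j).map Prod.snd := by
  induction is_ generalizing j with
  | nil => rfl
  | cons i rest ih =>
    simp only [frLoop3, List.map_cons, sel3]
    rcases hi : frLoop3Inner records (PySem.Str.join " " (PySem.List.slice parts none (some i)))
        (PySem.Str.join " " (PySem.List.slice parts (some i) none)) with _ | r
    · exact ih (j + 1)
    · rfl

-- B's single pass = A's staged computation, with accumulator merged in
theorem altLoop_eq (s : String) (cands : List (String × String))
    (records : List (List (String × String)))
    (best : Option (Nat × List (String × String))) :
    altLoop s cands records best =
      match frLoop1 records s with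
      | some r => some r
      | none => (mergeB best (selAll s cands records)).map Prod.snd := by
  induction records generalizing best with
  | nil => rcases best with _ | b <;> rfl
  | cons rec rest ih =>
    simp only [altLoop, frLoop1]
    by_cases h0 : (PySem.Str.join " " [frField rec "manufacturer", frField rec "model"]
        == s) = true
    · rw [if_pos h0, if_pos h0]
    · rw [if_neg h0, if_neg h0]
      rw [ih]
      have hstep :
          (match recRank s (frField rec "manufacturer") (frField rec "model") cands with
           | none => best
           | some r =>
             match best with
             | none => some (r, rec)
             | some b => if r < b.1 then some (r, rec) else best) =
          mergeB best ((recRank s (frField rec "manufacturer") (frField rec "model") cands).map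
            (fun r => (r, rec))) := by
        rcases hr : recRank s (frField rec "manufacturer") (frField rec "model") cands with _ | r
        · rcases best with _ | b <;> rfl
        · rcases best with _ | b
          · rfl
          · simp only [Option.map_some, mergeB]
            by_cases hlt : r < b.1
            · rw [if_pos hlt, if_neg (by omega)]
            · rw [if_neg hlt, if_pos (by omega)]
      rw [hstep, selAll, ← mergeB_assoc]

-- ===== VERDICT =====
theorem find_record_spec : Claim_equal_find_record := by
  intro records display_name registry_model_name _
  unfold Spec_find_record
  have hA : find_record records display_name registry_model_name =
      (match frLoop1 records (frSearchName display_name registry_model_name) with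
       | some rec => some rec
       | none =>
         match frLoop2 records (frSearchName display_name registry_model_name) with
         | some rec => some rec
         | none =>
           frLoop3 records (PySem.Str.split₀ (frSearchName display_name registry_model_name))
             (PySem.List.pyRange 1
               (PySem.List.len (PySem.Str.split₀ (frSearchName display_name registry_model_name))) 1)) := rfl
  have hB : find_record_alt records display_name registry_model_name =
      altLoop (frSearchName display_name registry_model_name)
        (altCands (PySem.Str.split₀ (frSearchName display_name registry_model_name))) records none := rfl
  rw [hA, hB, altLoop_eq]
  rcases h1 : frLoop1 records (frSearchName display_name registry_model_name) with _ | r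
  · rcases h2 : frLoop2 records (frSearchName display_name registry_model_name) with _ | r2
    · rw [selAll_of_loop2_none _ _ _ h2, frLoop3_eq_sel3 _ _ _ 0, mergeB_none]
      simp only [altCands]
    · rw [selAll_of_loop2 _ _ _ _ h2, mergeB_none]
      simp only [Option.map_some]
  · simp only []
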